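-- pv_equiv track=rewrite | github.com/AgrimNautiyal/foobar-2020-soln | 2.1_lovely_lucky_lambs.py | solution
-- ===== SOURCE A (Python) =====
-- def solution(total_lambs):
--     if total_lambs < 125:
--         return 1
--     if total_lambs  <10:
--         return 0
--     if total_lambs>=pow(10,9):
--         return 0
--
--     max_count = 1
--     max_sum = 1
--     index1 = 0
--     max_list=[max_sum]
--
--     while(max_sum+max_list[index1]*2<=total_lambs):
--         temp = max_list[index1]*2
--         max_sum+=temp
--         index1+=1
--         max_count+=1
--         max_list.append(temp)
--
--     #fibo
--     t1 = 1
--     t2 = 1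
--     min_count=2
--     min_sum = 2
--     min_list=[t1, t2]
--     index2 = 1
--     while(min_sum<=total_lambs):
--         temp = min_list[index2]+min_list[index2-1]
--         if temp+min_sum>total_lambs:
--             break
--         min_list.append(temp)
--         index2+=1
--         min_sum+=temp
--         min_count+=1
--     return (min_count-max_count)
-- ===== SOURCE B (Python) =====
-- def solution(total_lambs):
--     if total_lambs < 125:
--         return 1
--     if total_lambs >= 10 ** 9:
--         return 0
--     # max henchmen: greedy doubling sums to 2^k - 1, so closed form via bit_length
--     max_count = (total_lambs + 1).bit_length() - 1
--     # min henchmen: count Fibonacci numbers F(k) (F(1)=F(2)=1) with F(k) <= total_lambs + 1,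
--     # since sum of the first n Fibonacci payouts is F(n+2) - 1
--     a, b = 1, 2
--     min_count = 0
--     while b <= total_lambs + 1:
--         a, b = b, a + b
--         min_count += 1
--     return min_count - max_count
-- ===== Notes on version B (the rewrite author's own statement) =====
-- stated objective: simpler
-- what changed: Replaced the list-building doubling loop by a closed form via int.bit_length (the greedy geometric sum of k payouts is one below a power of two) and the list-building Fibonacci-sum loop by a two-variable loop counting Fibonacci numbers up to the threshold; no lists, no index bookkeeping.
import Mathlib
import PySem

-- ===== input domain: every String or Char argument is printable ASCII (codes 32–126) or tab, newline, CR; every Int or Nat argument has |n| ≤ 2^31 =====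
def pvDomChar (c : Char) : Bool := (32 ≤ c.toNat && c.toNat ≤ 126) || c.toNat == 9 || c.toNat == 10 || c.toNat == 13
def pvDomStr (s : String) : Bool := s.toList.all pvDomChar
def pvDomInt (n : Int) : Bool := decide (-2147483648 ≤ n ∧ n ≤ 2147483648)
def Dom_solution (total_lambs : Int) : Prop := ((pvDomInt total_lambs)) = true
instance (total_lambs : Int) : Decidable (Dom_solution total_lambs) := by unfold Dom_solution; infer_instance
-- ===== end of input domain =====

-- B replaces A's list-building doubling loop by the bit_length closed form and A's
-- list-building Fibonacci-sum loop by a two-variable count of Fibonacci numbers ≤ total_lambs+1 (objective: simpler).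

-- ===== PORT A =====
-- A's doubling while-loop; fuel only makes the recursion total (64 exceeds the ≤ 30
-- iterations possible under A's guards; the loop body is Python's, step for step).
def solutionMaxLoop (t : Int) : Nat → Int → Int → Int → List Int → Int
  | 0, _, _, count, _ => count
  | fuel+1, sum, i, count, lst =>
    match PySem.List.pyGet? lst i with
    | none => count  -- IndexError: unreachable, i < lst.length throughout
    | some v =>
      if sum + v * 2 ≤ t then
        solutionMaxLoop t fuel (sum + v * 2) (i + 1) (count + 1) (lst ++ [v * 2])
      else count

-- A's Fibonacci while-loop, same fuel convention.
def solutionMinLoop (t : Int) : Nat → Int → Int → Int → List Int → Int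
  | 0, _, _, count, _ => count
  | fuel+1, sum, i, count, lst =>
    if sum ≤ t then
      match PySem.List.pyGet? lst i, PySem.List.pyGet? lst (i - 1) with
      | some x, some y =>
        if x + y + sum > t then count
        else solutionMinLoop t fuel (sum + (x + y)) (i + 1) (count + 1) (lst ++ [x + y])
      | _, _ => count  -- IndexError: unreachable
    else count

def solution (total_lambs : Int) : Int :=
  if total_lambs < 125 then 1
  else if total_lambs < 10 then 0
  else if total_lambs ≥ 10 ^ 9 then 0
  else
    let maxres := solutionMaxLoop total_lambs 64 1 0 1 [1]
    let minres := solutionMinLoop total_lambs 64 2 1 2 [1, 1]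
    minres - maxres

-- ===== PORT B =====
-- B's two-variable loop: count Fibonacci numbers ≤ total_lambs + 1.
def solutionAltLoop (t : Int) : Nat → Int → Int → Int → Int
  | 0, _, _, c => c
  | fuel+1, a, b, c => if b ≤ t + 1 then solutionAltLoop t fuel b (a + b) (c + 1) else c

def solution_alt (total_lambs : Int) : Int :=
  if total_lambs < 125 then 1
  else if total_lambs ≥ 10 ^ 9 then 0
  else
    let max_count : Int := (PySem.Int.bitLength (total_lambs + 1) : Int) - 1
    let min_count := solutionAltLoop total_lambs 64 1 2 0
    min_count - max_count

-- ===== PRECONDITION & SPEC =====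
def Spec_solution (total_lambs : Int) (out : Int) : Prop := out = solution_alt total_lambs
instance (total_lambs : Int) (out : Int) : Decidable (Spec_solution total_lambs out) := by unfold Spec_solution; infer_instance

-- ===== CLAIM (what is proved, stated in full; the proofs are below) =====
def Claim_equal_solution : Prop := ∀ (total_lambs : Int), Dom_solution total_lambs → Spec_solution total_lambs (solution total_lambs)

-- ===== LEMMAS AND PROOFS =====

-- Common counter both Fibonacci loops reduce to: step m while fib (m+3) ≤ t+1.
def fibRun (t : Int) : Nat → Nat → Nat
  | 0, m => m
  | fuel+1, m => if ((Nat.fib (m + 3) : Int) ≤ t + 1) then fibRun t fuel (m + 1) else m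

theorem fibRun_fuel_irrel (t : Int) :
    ∀ (f g m : Nat), t + 1 < (Nat.fib (m + 3 + f) : Int) → t + 1 < (Nat.fib (m + 3 + g) : Int) →
    fibRun t f m = fibRun t g m := by
  intro f
  induction f with
  | zero =>
    intro g m hf hg
    cases g with
    | zero => rfl
    | succ g =>
      simp only [Nat.add_zero] at hf
      simp only [fibRun, if_neg (by omega : ¬ ((Nat.fib (m + 3) : Int) ≤ t + 1))]
  | succ f ih =>
    intro g m hf hg
    by_cases hc : (Nat.fib (m + 3) : Int) ≤ t + 1
    · have hg0 : g ≠ 0 := by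
        rintro rfl
        simp only [Nat.add_zero] at hg
        omega
      obtain ⟨g', rfl⟩ := Nat.exists_eq_succ_of_ne_zero hg0
      simp only [fibRun, if_pos hc]
      exact ih g' (m + 1) (by have := hf; rw [show m + 1 + 3 + f = m + 3 + (f+1) by ring]; exact this)
        (by have := hg; rw [show m + 1 + 3 + g' = m + 3 + (g'+1) by ring]; exact this)
    · cases g with
      | zero =>
        simp only [fibRun, if_neg hc]
      | succ g => simp only [fibRun, if_neg hc]

theorem altLoop_eq_fibRun (t : Int) :
    ∀ (f c : Nat), solutionAltLoop t f (Nat.fib (c + 2) : Int) (Nat.fib (c + 3) : Int) (c : Int)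
      = (fibRun t f c : Int) := by
  intro f
  induction f with
  | zero => intro c; rfl
  | succ f ih =>
    intro c
    simp only [solutionAltLoop, fibRun]
    by_cases hc : (Nat.fib (c + 3) : Int) ≤ t + 1
    · rw [if_pos hc, if_pos hc]
      have hn : Nat.fib (c + 1 + 3) = Nat.fib (c + 2) + Nat.fib (c + 3) := by
        have h := Nat.fib_add_two (n := c + 2)
        simpa [show c + 2 + 2 = c + 1 + 3 by ring, show c + 2 + 1 = c + 3 by ring] using h
      have h1 : (Nat.fib (c + 2) : Int) + (Nat.fib (c + 3) : Int) = (Nat.fib (c + 1 + 3) : Int) := by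
        rw [hn]; push_cast; ring
      have h2 : ((c : Int) + 1) = ((c + 1 : Nat) : Int) := by push_cast; ring
      rw [h1, h2, show (Nat.fib (c + 3) : Int) = (Nat.fib (c + 1 + 2) : Int) by norm_num]
      exact ih (c + 1)
    · rw [if_neg hc, if_neg hc]

def fibList (m : Nat) : List Int := (List.range m).map (fun k => (Nat.fib (k + 1) : Int))

theorem fibList_get (m k : Nat) (h : k < m) :
    PySem.List.pyGet? (fibList m) ((k : Nat) : Int) = some ((Nat.fib (k + 1) : Int)) := by
  rw [PySem.List.pyGet?_natCast]
  simp [fibList, h]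

theorem minLoop_eq_fibRun (t : Int) :
    ∀ (f m : Nat), 2 ≤ m → (Nat.fib (m + 2) : Int) ≤ t + 1 →
    solutionMinLoop t f ((Nat.fib (m + 2) : Int) - 1) ((m : Int) - 1) (m : Int) (fibList m)
      = (fibRun t f m : Int) := by
  intro f
  induction f with
  | zero => intro m _ _; rfl
  | succ f ih =>
    intro m hm hsum
    have hx : PySem.List.pyGet? (fibList m) ((m : Int) - 1) = some ((Nat.fib m : Int)) := by
      rw [show (m : Int) - 1 = ((m - 1 : Nat) : Int) by omega, fibList_get m (m - 1) (by omega),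
        show m - 1 + 1 = m by omega]
    have hy : PySem.List.pyGet? (fibList m) ((m : Int) - 1 - 1) = some ((Nat.fib (m - 1) : Int)) := by
      rw [show (m : Int) - 1 - 1 = ((m - 2 : Nat) : Int) by omega, fibList_get m (m - 2) (by omega),
        show m - 2 + 1 = m - 1 by omega]
    have hfib : (Nat.fib m : Int) + (Nat.fib (m - 1) : Int) = (Nat.fib (m + 1) : Int) := by
      have h := Nat.fib_add_two (n := m - 1)
      rw [show m - 1 + 2 = m + 1 by omega, show m - 1 + 1 = m by omega] at h
      rw [h]; push_cast; ring
    have hfib3 : (Nat.fib (m + 1) : Int) + (Nat.fib (m + 2) : Int) = (Nat.fib (m + 3) : Int) := by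
      have h := Nat.fib_add_two (n := m + 1)
      rw [show m + 1 + 2 = m + 3 by omega, show m + 1 + 1 = m + 2 by omega] at h
      rw [h]; push_cast; ring
    simp only [solutionMinLoop, fibRun, if_pos (by omega : (Nat.fib (m + 2) : Int) - 1 ≤ t), hx, hy]
    by_cases hc : (Nat.fib (m + 3) : Int) ≤ t + 1
    · rw [if_neg (by omega), if_pos hc]
      have hlst : fibList m ++ [(Nat.fib m : Int) + (Nat.fib (m - 1) : Int)] = fibList (m + 1) := by
        rw [hfib]
        simp [fibList, List.range_succ]
      rw [hlst,
        show (Nat.fib (m + 2) : Int) - 1 + ((Nat.fib m : Int) + (Nat.fib (m - 1) : Int))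
            = (Nat.fib (m + 1 + 2) : Int) - 1 by rw [show m + 1 + 2 = m + 3 by omega]; omega,
        show (m : Int) - 1 + 1 = ((m + 1 : Nat) : Int) - 1 by push_cast; ring,
        show (m : Int) + 1 = ((m + 1 : Nat) : Int) by push_cast; ring]
      exact ih (m + 1) (by omega) (by rw [show m + 1 + 2 = m + 3 by omega]; exact hc)
    · rw [if_pos (by omega), if_neg hc]

def powList (j : Nat) : List Int := (List.range (j + 1)).map (fun k => ((2 : Int) ^ k))

theorem powList_get (j : Nat) :
    PySem.List.pyGet? (powList j) ((j : Nat) : Int) = some ((2 : Int) ^ j) := by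
  rw [PySem.List.pyGet?_natCast]
  simp [powList]

theorem one_le_bl (t : Int) (ht : 0 < t + 1) : 1 ≤ PySem.Int.bitLength (t + 1) := by
  by_contra h
  have h2 := PySem.Int.lt_two_pow_bitLength (t + 1)
  have h0 : PySem.Int.bitLength (t + 1) = 0 := by omega
  rw [h0, pow_zero] at h2
  omega

theorem pow_le_iff_le_bl (t : Int) (ht : 0 < t + 1) (k : Nat) :
    ((2 : Int) ^ k ≤ t + 1) ↔ k ≤ PySem.Int.bitLength (t + 1) - 1 := by
  have hne : t + 1 ≠ 0 := by omega
  have h1 := PySem.Int.two_pow_bitLength_le (t + 1) hne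
  have h2 := PySem.Int.lt_two_pow_bitLength (t + 1)
  have hbl := one_le_bl t ht
  have habs : (((t + 1).natAbs : Nat) : Int) = t + 1 := Int.natAbs_of_nonneg (by omega)
  constructor
  · intro h
    by_contra hk
    have hk' : PySem.Int.bitLength (t + 1) ≤ k := by omega
    have hmono : (2 : Nat) ^ PySem.Int.bitLength (t + 1) ≤ 2 ^ k :=
      Nat.pow_le_pow_right (by norm_num) hk'
    have hz : ((2 ^ k : Nat) : Int) ≤ (((t + 1).natAbs : Nat) : Int) := by
      rw [habs]; push_cast; exact h
    have hzz : (2 ^ k : Nat) ≤ (t + 1).natAbs := by exact_mod_cast hz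
    omega
  · intro hk
    have hmono : (2 : Nat) ^ k ≤ 2 ^ (PySem.Int.bitLength (t + 1) - 1) :=
      Nat.pow_le_pow_right (by norm_num) hk
    have hle : (2 : Nat) ^ k ≤ (t + 1).natAbs := le_trans hmono h1
    calc (2 : Int) ^ k = ((2 ^ k : Nat) : Int) := by push_cast; ring
      _ ≤ (((t + 1).natAbs : Nat) : Int) := by exact_mod_cast hle
      _ = t + 1 := habs


theorem maxLoop_eq_bl (t : Int) (ht : 0 < t + 1) :
    ∀ (f j : Nat), j + 1 ≤ PySem.Int.bitLength (t + 1) - 1 →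
      PySem.Int.bitLength (t + 1) - 1 < j + 1 + f →
    solutionMaxLoop t f ((2 : Int) ^ (j + 1) - 1) (j : Int) ((j : Int) + 1) (powList j)
      = ((PySem.Int.bitLength (t + 1) - 1 : Nat) : Int) := by
  intro f
  induction f with
  | zero => intro j h1 h2; omega
  | succ f ih =>
    intro j h1 h2
    have e1 : (2 : Int) ^ (j + 1) = 2 * 2 ^ j := by ring
    have e2 : (2 : Int) ^ (j + 2) = 2 * 2 ^ (j + 1) := by ring
    have hiff := pow_le_iff_le_bl t ht (j + 2)
    simp only [solutionMaxLoop, powList_get]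
    by_cases hc : j + 2 ≤ PySem.Int.bitLength (t + 1) - 1
    · have hcond : (2 : Int) ^ (j + 1) - 1 + 2 ^ j * 2 ≤ t := by
        have := hiff.mpr hc
        omega
      rw [if_pos hcond]
      have hlst : powList j ++ [(2 : Int) ^ j * 2] = powList (j + 1) := by
        rw [show (2 : Int) ^ j * 2 = 2 ^ (j + 1) by ring]
        simp [powList, List.range_succ]
      rw [hlst,
        show (2 : Int) ^ (j + 1) - 1 + 2 ^ j * 2 = (2 : Int) ^ (j + 1 + 1) - 1 by ring,
        show (j : Int) + 1 = ((j + 1 : Nat) : Int) by push_cast; ring]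
      exact ih (j + 1) (by omega) (by omega)
    · have hcond : ¬ ((2 : Int) ^ (j + 1) - 1 + 2 ^ j * 2 ≤ t) := by
        intro h
        exact hc (hiff.mp (by omega))
      rw [if_neg hcond]
      omega

-- ===== VERDICT (by name: the statement is the Claim_ definition above) =====
theorem fib67_big : (2147483649 : Int) < (Nat.fib 67 : Int) := by decide

theorem fib69_big : (2147483649 : Int) < (Nat.fib 69 : Int) := by decide

theorem solution_spec : Claim_equal_solution := by
  unfold Claim_equal_solution
  intro t hdom
  unfold Spec_solution solution solution_alt
  have hd : -2147483648 ≤ t ∧ t ≤ 2147483648 := by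
    simpa [Dom_solution, pvDomInt] using hdom
  by_cases h1 : t < 125
  · simp [h1]
  · rw [if_neg h1, if_neg h1, if_neg (by omega : ¬ (t < 10))]
    by_cases h2 : t ≥ 10 ^ 9
    · rw [if_pos h2, if_pos h2]
    · rw [if_neg h2, if_neg h2]
      have ht : 0 < t + 1 := by omega
      have hL1 : 1 ≤ PySem.Int.bitLength (t + 1) - 1 := by
        have := (pow_le_iff_le_bl t ht 1).mp (by norm_num; omega)
        omega
      have hL65 : PySem.Int.bitLength (t + 1) - 1 < 65 := by
        by_contra hL
        have := (pow_le_iff_le_bl t ht 65).mpr (by omega)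
        norm_num at this
        omega
      have hmax : solutionMaxLoop t 64 1 0 1 [1]
          = ((PySem.Int.bitLength (t + 1) - 1 : Nat) : Int) := by
        have h := maxLoop_eq_bl t ht 64 0 (by omega) (by omega)
        norm_num [powList] at h
        exact h
      have hminA : solutionMinLoop t 64 2 1 2 [1, 1] = (fibRun t 64 2 : Int) := by
        have h := minLoop_eq_fibRun t 64 2 (by omega)
          (by rw [show (2 : Nat) + 2 = 4 by rfl, show Nat.fib 4 = 3 by decide]; omega)
        norm_num [fibList, List.range_succ, show Nat.fib 4 = 3 by decide,
          show Nat.fib 1 = 1 by decide, show Nat.fib 2 = 1 by decide] at h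
        exact h
      have hminB : solutionAltLoop t 64 1 2 0 = (fibRun t 64 0 : Int) := by
        have h := altLoop_eq_fibRun t 64 0
        norm_num [show Nat.fib 2 = 1 by decide, show Nat.fib 3 = 2 by decide] at h
        exact h
      have hrun : fibRun t 64 0 = fibRun t 64 2 := by
        have e1 : fibRun t 64 0 = fibRun t 62 2 := by
          simp only [fibRun, show ((0:Nat) + 3) = 3 by rfl, show ((1:Nat) + 3) = 4 by rfl,
            show Nat.fib 3 = 2 by decide, show Nat.fib 4 = 3 by decide]
          rw [if_pos (by omega), if_pos (by omega)]
        have e2 : fibRun t 62 2 = fibRun t 64 2 := by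
          apply fibRun_fuel_irrel
          · calc t + 1 ≤ 2147483649 := by omega
              _ < (Nat.fib 67 : Int) := fib67_big
          · calc t + 1 ≤ 2147483649 := by omega
              _ < (Nat.fib 69 : Int) := fib69_big
        rw [e1, e2]
      have hbl : ((PySem.Int.bitLength (t + 1) - 1 : Nat) : Int)
          = (PySem.Int.bitLength (t + 1) : Int) - 1 := by
        have := one_le_bl t ht
        omega
      show solutionMinLoop t 64 2 1 2 [1, 1] - solutionMaxLoop t 64 1 0 1 [1]
        = solutionAltLoop t 64 1 2 0 - ((PySem.Int.bitLength (t + 1) : Int) - 1)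
      rw [hmax, hminA, hminB, hrun, hbl]
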